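-- pv_equiv track=rewrite | github.com/LorenzoTribuiani98/LAAI-Cubics | Paradigms/Q_table/Q_table.py | deindexing
-- ===== SOURCE A (Python) =====
-- def deindexing(number):
--     """
--     Given the q_table index construct the field observation
--
--     Parameters:
--     ------------
--
--     - number: the q_table index
--     """
--     base10_digits = []
--     resto = number
--     while resto != 0:
--         base10_digits.append(resto%4)
--         resto = resto//4
--
--     while len(base10_digits) <10:
--         base10_digits.append(0)
--
--     base10_digits.reverse()
--     return base10_digits
-- ===== SOURCE B (Python) =====
-- def deindexing(number):
--     # Length-first: count base-4 digits, then emit big-endian positionally (no reverse).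
--     n = number
--     cnt = 0
--     while n:
--         n //= 4
--         cnt += 1
--     length = max(cnt, 10)
--     digits = []
--     for i in range(length - 1, -1, -1):
--         digits.append(number // 4 ** i % 4)
--     return digits
-- ===== Notes on version B (the rewrite author's own statement) =====
-- stated objective: alternative
-- what changed: Instead of extracting digits low-to-high into a list, padding it to 10 and reversing, B first counts the base-4 digits, fixes length = max(count, 10), and emits the digits big-endian in one forward positional pass (number // 4**i % 4), with no list reversal.
import Mathlib
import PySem

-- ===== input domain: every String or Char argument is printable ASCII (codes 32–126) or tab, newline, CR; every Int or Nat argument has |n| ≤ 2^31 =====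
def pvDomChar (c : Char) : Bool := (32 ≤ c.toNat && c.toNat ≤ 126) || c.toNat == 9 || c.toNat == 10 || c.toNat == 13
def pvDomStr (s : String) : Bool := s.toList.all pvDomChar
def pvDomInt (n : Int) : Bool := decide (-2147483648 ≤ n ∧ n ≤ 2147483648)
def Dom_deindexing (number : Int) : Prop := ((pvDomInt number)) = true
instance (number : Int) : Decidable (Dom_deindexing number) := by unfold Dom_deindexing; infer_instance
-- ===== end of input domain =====

-- B replaces A's low-to-high digit extraction + pad-to-10 + reverse with a length-first
-- big-endian positional pass (alternative decomposition, same asymptotic cost).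


-- ===== PORT A =====
-- A's 'while resto != 0' loop; the fuel only makes the function total (Python diverges on
-- negative input, excluded by Pre_; on Dom, |number| ≤ 2^31 needs at most 16 iterations).
def pvLoopA : Nat → Int → List Int → List Int
  | 0, _, ds => ds
  | f+1, resto, ds =>
    if resto ≠ 0 then
      pvLoopA f (PySem.Int.floordiv resto 4) (ds ++ [PySem.Int.mod resto 4])
    else ds

-- A's 'while len(base10_digits) < 10: append(0)'
def pvPadA (ds : List Int) : List Int :=
  if ds.length < 10 then pvPadA (ds ++ [0]) else ds
  termination_by 10 - ds.length
  decreasing_by simp_all; omega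

def deindexing (number : Int) : List Int :=
  (pvPadA (pvLoopA 64 number [])).reverse

-- ===== PORT B =====
-- B's 'while n: n //= 4; cnt += 1' (same fuel guard for totality as in A's port).
def pvCntB : Nat → Int → Int → Int
  | 0, _, cnt => cnt
  | f+1, n, cnt =>
    if n ≠ 0 then pvCntB f (PySem.Int.floordiv n 4) (cnt + 1) else cnt

-- '4 ** i' with i drawn from range(length-1, -1, -1), so i ≥ 0 and '^ i.toNat' is exact.
def deindexing_alt (number : Int) : List Int :=
  let length := max (pvCntB 64 number 0) 10
  (PySem.List.pyRange (length - 1) (-1) (-1)).foldl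
    (fun ds i => ds ++ [PySem.Int.mod (PySem.Int.floordiv number ((4:Int) ^ i.toNat)) 4]) []

-- ===== PRECONDITION & SPEC =====
-- Pre_ excludes negative numbers: A's first while-loop never terminates there
-- (resto // 4 stalls at -1), so A returns no value on them.
def Pre_deindexing (number : Int) : Prop := 0 ≤ number
instance (number : Int) : Decidable (Pre_deindexing number) := by unfold Pre_deindexing; infer_instance
def pvWitness_deindexing : Int := (37)

def Spec_deindexing (number : Int) (out : List Int) : Prop := out = deindexing_alt number
instance (number : Int) (out : List Int) : Decidable (Spec_deindexing number out) := by unfold Spec_deindexing; infer_instance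

-- ===== CLAIM (what is proved, stated in full; the proofs are below) =====
def Claim_equal_deindexing : Prop := ∀ (number : Int), Dom_deindexing number → Pre_deindexing number → Spec_deindexing number (deindexing number)

-- ===== LEMMAS AND PROOFS =====

-- low-endian base-4 digit vector of fixed length L (the common characterisation)
def pvLow : Nat → Int → List Int
  | 0, _ => []
  | L+1, n => PySem.Int.mod n 4 :: pvLow L (PySem.Int.floordiv n 4)

theorem pvLoopA_acc (f : Nat) : ∀ (n : Int) (ds : List Int),
    pvLoopA f n ds = ds ++ pvLoopA f n [] := by
  induction f with
  | zero => intro n ds; simp [pvLoopA]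
  | succ f ih =>
    intro n ds
    by_cases h : n = 0
    · simp [pvLoopA, h]
    · simp only [pvLoopA, if_pos (by exact h)]
      rw [ih _ (ds ++ _), ih _ ([] ++ _)]
      simp

theorem pvLoopA_len (f : Nat) (n : Int) (ds : List Int) :
    (pvLoopA f n ds).length = ds.length + (pvLoopA f n []).length := by
  rw [pvLoopA_acc]; simp

theorem pvCntB_len (f : Nat) : ∀ (n c : Int),
    pvCntB f n c = c + ((pvLoopA f n []).length : Int) := by
  induction f with
  | zero => intro n c; simp [pvCntB, pvLoopA]
  | succ f ih =>
    intro n c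
    by_cases h : n = 0
    · simp [pvCntB, pvLoopA, h]
    · have e1 : pvCntB (f+1) n c = pvCntB f (PySem.Int.floordiv n 4) (c+1) := by
        simp [pvCntB, h]
      have e2 : (pvLoopA (f+1) n []).length = (pvLoopA f (PySem.Int.floordiv n 4) []).length + 1 := by
        simp only [pvLoopA, if_pos (by exact h)]
        rw [pvLoopA_len]
        simp; omega
      rw [e1, ih, e2]
      push_cast; ring

theorem pvLow_zero (L : Nat) : pvLow L 0 = List.replicate L 0 := by
  induction L with
  | zero => rfl
  | succ L ih => simp [pvLow, PySem.Int.mod, PySem.Int.floordiv, ih, List.replicate]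

theorem pvEdivEdiv (a : Int) (ha : 0 ≤ a) (b c : Nat) :
    a / (b : Int) / (c : Int) = a / ((b * c : Nat) : Int) := by
  obtain ⟨m, rfl⟩ := Int.eq_ofNat_of_zero_le ha
  rw [← Int.natCast_div, ← Int.natCast_div, ← Int.natCast_div, Nat.div_div_eq_div_mul]

theorem pvFloordiv_floordiv (n : Int) (hn : 0 ≤ n) (L : Nat) :
    PySem.Int.floordiv (PySem.Int.floordiv n 4) ((4:Int) ^ L) = PySem.Int.floordiv n ((4:Int) ^ (L+1)) := by
  have h4 : (0:Int) < 4 := by norm_num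
  have hp : (0:Int) < (4:Int) ^ L := by positivity
  have hp1 : (0:Int) < (4:Int) ^ (L+1) := by positivity
  rw [PySem.Int.floordiv_eq_ediv_of_pos h4, PySem.Int.floordiv_eq_ediv_of_pos hp,
      PySem.Int.floordiv_eq_ediv_of_pos hp1]
  have : ((4:Int) ^ L) = (((4:Nat) ^ L : Nat) : Int) := by push_cast; ring
  rw [this]
  have h2 : ((4:Int) ^ (L+1)) = (((4 * 4 ^ L : Nat) : Nat) : Int) := by push_cast; ring
  rw [h2, ← pvEdivEdiv n hn 4 (4 ^ L)]
  norm_num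

theorem pvLow_snoc (L : Nat) : ∀ (n : Int), 0 ≤ n →
    pvLow (L+1) n = pvLow L n ++ [PySem.Int.mod (PySem.Int.floordiv n ((4:Int) ^ L)) 4] := by
  induction L with
  | zero =>
    intro n _
    simp [pvLow, PySem.Int.floordiv]
  | succ L ih =>
    intro n hn
    have hq : 0 ≤ PySem.Int.floordiv n 4 := by
      rw [PySem.Int.floordiv_eq_ediv_of_pos (by norm_num : (0:Int) < 4)]
      exact Int.ediv_nonneg hn (by norm_num)
    show PySem.Int.mod n 4 :: pvLow (L+1) (PySem.Int.floordiv n 4) = _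
    rw [ih _ hq, pvFloordiv_floordiv n hn L]
    simp [pvLow]

-- A's digit loop, padded to any sufficient length L, is exactly pvLow L n.
theorem pvKey (f : Nat) : ∀ (n : Int), 0 ≤ n → n < (4:Int) ^ f → ∀ (L : Nat),
    (pvLoopA f n []).length ≤ L →
    pvLoopA f n [] ++ List.replicate (L - (pvLoopA f n []).length) 0 = pvLow L n := by
  induction f with
  | zero =>
    intro n hn hlt L _
    have : n = 0 := by simp at hlt; omega
    subst this
    simp [pvLoopA, pvLow_zero]
  | succ f ih =>
    intro n hn hlt L hL
    by_cases h : n = 0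
    · subst h; simp [pvLoopA, pvLow_zero]
    · have hrec : pvLoopA (f+1) n [] = PySem.Int.mod n 4 :: pvLoopA f (PySem.Int.floordiv n 4) [] := by
        simp only [pvLoopA, if_pos (by exact h)]
        rw [pvLoopA_acc]; simp
      have hq : 0 ≤ PySem.Int.floordiv n 4 := by
        rw [PySem.Int.floordiv_eq_ediv_of_pos (by norm_num : (0:Int) < 4)]
        exact Int.ediv_nonneg hn (by norm_num)
      have hqlt : PySem.Int.floordiv n 4 < (4:Int) ^ f := by
        rw [PySem.Int.floordiv_lt_iff_lt_mul (by norm_num : (0:Int) < 4)]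
        calc n < (4:Int) ^ (f+1) := hlt
          _ = 4 ^ f * 4 := by ring
      rw [hrec] at hL ⊢
      cases L with
      | zero => simp at hL
      | succ L =>
        simp only [List.length_cons] at hL
        have := ih (PySem.Int.floordiv n 4) hq hqlt L (by omega)
        simp only [List.length_cons, List.cons_append, List.cons.injEq, true_and, pvLow]
        rw [show (L + 1 - ((pvLoopA f (PySem.Int.floordiv n 4) []).length + 1))
              = L - (pvLoopA f (PySem.Int.floordiv n 4) []).length by omega]
        exact this

theorem pvPadA_eq (ds : List Int) : pvPadA ds = ds ++ List.replicate (10 - ds.length) 0 := by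
  by_cases h : ds.length < 10
  · rw [pvPadA, if_pos h, pvPadA_eq (ds ++ [0])]
    have h1 : (ds ++ [0]).length = ds.length + 1 := by simp
    rw [h1, List.append_assoc]
    congr 1
    rw [show 10 - ds.length = (10 - (ds.length + 1)) + 1 by omega, List.replicate_succ]
    simp
  · rw [pvPadA, if_neg h, show 10 - ds.length = 0 by omega]
    simp
  termination_by 10 - ds.length
  decreasing_by simp_all; omega

-- B's descending-range fold builds (pvLow L n).reverse.
theorem pvBigFold (L : Nat) : ∀ (n : Int), 0 ≤ n → ∀ (ds : List Int),
    (PySem.List.pyRange ((L : Int) - 1) (-1) (-1)).foldl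
      (fun ds i => ds ++ [PySem.Int.mod (PySem.Int.floordiv n ((4:Int) ^ i.toNat)) 4]) ds
      = ds ++ (pvLow L n).reverse := by
  induction L with
  | zero =>
    intro n _ ds
    rw [PySem.List.pyRange_neg_one_eq_nil (by simp)]
    simp [pvLow]
  | succ L ih =>
    intro n hn ds
    have : ((L + 1 : Nat) : Int) - 1 = (L : Int) := by push_cast; ring
    rw [this, PySem.List.pyRange_neg_one_cons (by omega)]
    simp only [List.foldl_cons]
    rw [ih n hn]
    rw [pvLow_snoc L n hn]
    simp

theorem deindexing_eq_low (n : Int) (hn : 0 ≤ n) (hlt : n < (4:Int) ^ 64) :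
    deindexing n = (pvLow (max (pvLoopA 64 n []).length 10) n).reverse := by
  unfold deindexing
  rw [pvPadA_eq]
  congr 1
  have hlen : (pvLoopA 64 n []).length ≤ max (pvLoopA 64 n []).length 10 := le_max_left _ _
  rw [show (10 - (pvLoopA 64 n []).length)
        = max (pvLoopA 64 n []).length 10 - (pvLoopA 64 n []).length by omega]
  exact pvKey 64 n hn hlt _ hlen

-- ===== VERDICT (by name: the statement is the Claim_ definition above) =====
theorem deindexing_spec : Claim_equal_deindexing := by
  intro n hdom hpre
  unfold Spec_deindexing
  have hn : 0 ≤ n := hpre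
  have hbound : n ≤ 2147483648 := by
    simp [Dom_deindexing, pvDomInt] at hdom; omega
  have hlt : n < (4:Int) ^ 64 := by
    calc n ≤ 2147483648 := hbound
      _ < (4:Int) ^ 64 := by norm_num
  rw [deindexing_eq_low n hn hlt]
  unfold deindexing_alt
  rw [pvCntB_len 64 n 0]
  have hmax : (0 + ((pvLoopA 64 n []).length : Int)) ⊔ 10
      = ((max (pvLoopA 64 n []).length 10 : Nat) : Int) := by push_cast; omega
  simp only [hmax]
  rw [pvBigFold (max (pvLoopA 64 n []).length 10) n hn []]
  simp
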